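-- pv_equiv track=rewrite | github.com/Chainso/the-seer | scripts/ingest_history_events.py | _split_ranges
-- ===== SOURCE A (Python) =====
-- def _split_ranges(total: int, parts: int) -> list[tuple[int, int]]:
--     if parts <= 0:
--         return []
--     ranges: list[tuple[int, int]] = []
--     base = total // parts
--     remainder = total % parts
--     start = 0
--     for idx in range(parts):
--         size = base + (1 if idx < remainder else 0)
--         end = start + size
--         if start < end:
--             ranges.append((start, end))
--         start = end
--     return ranges
-- ===== SOURCE B (Python) =====
-- def _split_ranges(total: int, parts: int) -> list[tuple[int, int]]:
--     # Greedy peel: repeatedly take ceil(remaining_total / remaining_parts) as the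
--     # next chunk; re-dividing the shrinking problem front-loads the remainder.
--     ranges: list[tuple[int, int]] = []
--     start = 0
--     while parts > 0:
--         size = -(-total // parts)  # ceiling division of what is left
--         if size > 0:
--             ranges.append((start, start + size))
--         start += size
--         total -= size
--         parts -= 1
--     return ranges
-- ===== Notes on version B (the rewrite author's own statement) =====
-- stated objective: alternative
-- what changed: Replaced A's one-shot divmod with indexed remainder distribution (size = base + (idx < remainder)) by a greedy peel: a loop over the shrinking problem that takes ceil(remaining_total/remaining_parts) as the next chunk, redoing the division each step with no base/remainder pair and no index comparison.
import Mathlib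
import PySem

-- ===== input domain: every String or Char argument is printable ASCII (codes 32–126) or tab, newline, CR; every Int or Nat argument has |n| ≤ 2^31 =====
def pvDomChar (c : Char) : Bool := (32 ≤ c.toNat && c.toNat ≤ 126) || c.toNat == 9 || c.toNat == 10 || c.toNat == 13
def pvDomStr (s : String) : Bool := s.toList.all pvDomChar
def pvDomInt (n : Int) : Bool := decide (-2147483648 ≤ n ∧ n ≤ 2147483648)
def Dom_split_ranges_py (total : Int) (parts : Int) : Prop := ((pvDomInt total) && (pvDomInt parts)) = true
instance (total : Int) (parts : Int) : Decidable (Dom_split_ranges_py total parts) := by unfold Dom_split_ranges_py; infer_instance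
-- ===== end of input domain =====

-- B replaces A's one-shot divmod + indexed remainder distribution with a greedy peel:
-- repeatedly take ceil(remaining_total / remaining_parts) as the next chunk (objective: alternative algorithm; same cost).

-- ===== PORT A =====
def split_ranges_py (total : Int) (parts : Int) : List (Int × Int) :=
  if parts ≤ 0 then []
  else
    let base := PySem.Int.floordiv total parts
    let remainder := PySem.Int.mod total parts
    let st := (PySem.List.pyRange 0 parts 1).foldl
      (fun (st : List (Int × Int) × Int) idx =>
        let size := base + (if idx < remainder then 1 else 0)
        let e := st.2 + size
        (if st.2 < e then st.1 ++ [(st.2, e)] else st.1, e))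
      ([], 0)
    st.1

-- ===== PORT B =====
-- while parts > 0: peel one chunk of size ceil(total/parts); fuel = number of
-- remaining iterations (= parts while positive), state (start, total, ranges)
def pvAltGo : Nat → Int → Int → List (Int × Int) → List (Int × Int)
  | 0, _, _, res => res
  | Nat.succ n, start, total, res =>
      let size := -(PySem.Int.floordiv (-total) ((n : Int) + 1))
      pvAltGo n (start + size) (total - size)
        (if 0 < size then res ++ [(start, start + size)] else res)

def split_ranges_py_alt (total : Int) (parts : Int) : List (Int × Int) :=
  pvAltGo parts.toNat 0 total []

-- ===== PRECONDITION & SPEC =====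
def Spec_split_ranges_py (total : Int) (parts : Int) (out : List (Int × Int)) : Prop := out = split_ranges_py_alt total parts
instance (total : Int) (parts : Int) (out : List (Int × Int)) : Decidable (Spec_split_ranges_py total parts out) := by unfold Spec_split_ranges_py; infer_instance

-- ===== CLAIM (what is proved, stated in full; the proofs are below) =====
def Claim_equal_split_ranges_py : Prop := ∀ (total : Int) (parts : Int), Dom_split_ranges_py total parts → Spec_split_ranges_py total parts (split_ranges_py total parts)

-- ===== LEMMAS AND PROOFS =====

-- one loop step of A advances the boundary formula bnd i = i*base + min i rem by exactly A's `size`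
theorem pv_bound_step (base rem i : Int) :
    (i * base + min i rem) + (base + (if i < rem then 1 else 0)) = (i + 1) * base + min (i + 1) rem := by
  by_cases h : i < rem
  · have h1 : min i rem = i := by omega
    have h2 : min (i + 1) rem = i + 1 := by omega
    simp only [h, if_pos, h1, h2]
    ring
  · have h1 : min i rem = rem := by omega
    have h2 : min (i + 1) rem = rem := by omega
    simp only [h, if_neg, h1, h2, not_false_iff]
    ring

-- A's loop invariant: starting the fold at boundary bnd a over range [a, a+n) yields the
-- boundary filter-map appended to the accumulator
theorem pv_loop (base rem : Int) :
    ∀ (n : Nat) (a : Int) (acc : List (Int × Int)),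
      (PySem.List.pyRange a (a + n) 1).foldl
        (fun (st : List (Int × Int) × Int) idx =>
          let size := base + (if idx < rem then 1 else 0)
          let e := st.2 + size
          (if st.2 < e then st.1 ++ [(st.2, e)] else st.1, e))
        (acc, a * base + min a rem)
      = (acc ++ ((PySem.List.pyRange a (a + n) 1).filter
            (fun i => i * base + min i rem < (i + 1) * base + min (i + 1) rem)).map
            (fun i => (i * base + min i rem, (i + 1) * base + min (i + 1) rem)),
         (a + n) * base + min (a + n) rem) := by
  intro n
  induction n with
  | zero =>
    intro a acc
    rw [PySem.List.pyRange_one_eq_nil (by omega)]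
    simp
  | succ m ih =>
    intro a acc
    rw [PySem.List.pyRange_one_cons (by omega : a < a + (m + 1 : Nat))]
    simp only [List.filter_cons, List.foldl]
    have hstep : a * base + min a rem + (base + (if a < rem then 1 else 0))
        = (a + 1) * base + min (a + 1) rem := pv_bound_step base rem a
    by_cases hc : a * base + min a rem < (a + 1) * base + min (a + 1) rem
    · simp only [hstep, hc, if_pos, decide_true]
      have h1 : a + (m + 1 : Nat) = (a + 1) + (m : Nat) := by push_cast; ring
      rw [h1]
      rw [ih (a + 1) (acc ++ [(a * base + min a rem, (a + 1) * base + min (a + 1) rem)])]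
      simp
    · simp only [hstep, hc, if_neg, not_false_iff, decide_false]
      have h1 : a + (m + 1 : Nat) = (a + 1) + (m : Nat) := by push_cast; ring
      rw [h1]
      rw [ih (a + 1) acc]
      simp

-- the peeled chunk size ceil(t/(n+1)) in terms of a representation t = base*(n+1) + rem
theorem pv_ceil (base rem t : Int) (n : Nat) (ht : t = base * ((n : Int) + 1) + rem)
    (h0 : 0 ≤ rem) (h1 : rem ≤ (n : Int) + 1) :
    -(PySem.Int.floordiv (-t) ((n : Int) + 1)) = base + (if 0 < rem then 1 else 0) := by
  rw [PySem.Int.neg_floordiv_neg_eq_iff_of_pos (by omega : (0:Int) < (n : Int) + 1)]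
  by_cases h : 0 < rem
  · simp only [h, if_pos]
    constructor <;> nlinarith
  · simp only [h, if_neg, not_false_iff]
    constructor <;> nlinarith

-- shifting the boundary formula across one peel: bnd (k+1) = size + bnd' k
theorem pv_bnd_shift (base rem k : Int) (hk : 0 ≤ k) (h0 : 0 ≤ rem) :
    (k + 1) * base + min (k + 1) rem
      = (base + (if 0 < rem then 1 else 0)) + (k * base + min k (rem - (if 0 < rem then 1 else 0))) := by
  by_cases h : 0 < rem
  · have h1 : min (k + 1) rem = min k (rem - 1) + 1 := by omega
    simp only [h, if_pos, h1]
    ring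
  · have h2 : min (k + 1) rem = rem := by omega
    have h3 : min k (rem - 0) = rem := by omega
    simp only [h, if_neg, not_false_iff, h2, sub_zero]
    have h3' : min k rem = rem := by omega
    rw [h3']
    ring

-- reindexing one peel: the boundary list over k+1 (w.r.t. rem) equals the shifted
-- boundary list over k (w.r.t. rem')
theorem pv_reindex (base rem rem' start size : Int) (m : Nat)
    (hkey : ∀ k : Int, 0 ≤ k →
      (k + 1) * base + min (k + 1) rem = size + (k * base + min k rem')) :
    List.map (fun i => (start + size + (i * base + min i rem'), start + size + ((i + 1) * base + min (i + 1) rem')))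
      (List.filter (fun i => decide (i * base + min i rem' < (i + 1) * base + min (i + 1) rem'))
        ((List.range m).map (fun k : Nat => (0 : Int) + k)))
    = List.map (fun i => (start + (i * base + min i rem), start + ((i + 1) * base + min (i + 1) rem)))
      (List.filter (fun i => decide (i * base + min i rem < (i + 1) * base + min (i + 1) rem))
        ((List.range m).map (fun k : Nat => (1 : Int) + k))) := by
  simp only [List.filter_map, List.map_map]
  have hfc : ∀ k ∈ List.range m,
      ((fun i => decide (i * base + min i rem' < (i + 1) * base + min (i + 1) rem')) ∘ fun k : Nat => (0 : Int) + k) k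
      = ((fun i => decide (i * base + min i rem < (i + 1) * base + min (i + 1) rem)) ∘ fun k : Nat => (1 : Int) + k) k := by
    intro k _
    have e0 : (0 : Int) + (k : Int) = (k : Int) := by ring
    have e1 : (1 : Int) + (k : Int) = (k : Int) + 1 := by ring
    have h1 := hkey (k : Int) (by positivity)
    have h2 := hkey ((k : Int) + 1) (by positivity)
    simp only [Function.comp_apply, e0, e1, decide_eq_decide]
    rw [h1, h2, add_lt_add_iff_left]
  rw [List.filter_congr hfc]
  apply List.map_congr_left
  intro k hk
  simp only [List.mem_filter] at hk
  have e0 : (0 : Int) + (k : Int) = (k : Int) := by ring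
  have e1 : (1 : Int) + (k : Int) = (k : Int) + 1 := by ring
  have h1 := hkey (k : Int) (by positivity)
  have h2 := hkey ((k : Int) + 1) (by positivity)
  simp only [Function.comp_apply, e0, e1, Prod.mk.injEq]
  rw [h1, h2]
  constructor <;> ring

-- B's peel invariant: pvAltGo over n remaining parts with t = base*n + rem produces the
-- same boundary filter-map (shifted by start) appended to the accumulator
theorem pv_peel :
    ∀ (n : Nat) (base rem start t : Int) (res : List (Int × Int)),
      t = base * (n : Int) + rem → 0 ≤ rem → rem ≤ (n : Int) →
      pvAltGo n start t res
        = res ++ ((PySem.List.pyRange 0 (n : Int) 1).filter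
              (fun i => i * base + min i rem < (i + 1) * base + min (i + 1) rem)).map
              (fun i => (start + (i * base + min i rem), start + ((i + 1) * base + min (i + 1) rem))) := by
  intro n
  induction n with
  | zero =>
    intro base rem start t res _ _ _
    rw [PySem.List.pyRange_one_eq_nil (by omega)]
    simp [pvAltGo]
  | succ m ih =>
    intro base rem start t res ht h0 h1
    have hcast : ((m + 1 : Nat) : Int) = (m : Int) + 1 := by push_cast; ring
    rw [hcast] at ht h1
    have hsize : -(PySem.Int.floordiv (-t) ((m : Int) + 1)) = base + (if 0 < rem then 1 else 0) :=
      pv_ceil base rem t m ht h0 h1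
    set rem' := rem - (if 0 < rem then 1 else 0) with hrem'
    have hrem'0 : 0 ≤ rem' := by rw [hrem']; split_ifs <;> omega
    have hrem'1 : rem' ≤ (m : Int) := by rw [hrem']; split_ifs <;> omega
    have ht' : t - (base + (if 0 < rem then 1 else 0)) = base * (m : Int) + rem' := by
      rw [hrem', ht]; ring
    show pvAltGo (m + 1) start t res = _
    rw [pvAltGo]
    simp only [hsize]
    rw [ih base rem' (start + (base + (if 0 < rem then 1 else 0)))
        (t - (base + (if 0 < rem then 1 else 0)))
        _ ht' hrem'0 hrem'1]
    -- peel i = 0 off the (m+1)-range and reindex the rest through k ↦ 1 + k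
    have hm : (((m : Int) + 1) - 1).toNat = m := by omega
    have hm0 : (((m : Int) - 0).toNat) = m := by omega
    rw [hcast, PySem.List.pyRange_one_cons (by omega : (0:Int) < (m : Int) + 1), zero_add,
        PySem.List.pyRange_one 1 ((m : Int) + 1), PySem.List.pyRange_one 0 (m : Int),
        hm, hm0]
    have hb0 : (0 : Int) * base + min 0 rem = 0 := by
      have : min (0 : Int) rem = 0 := by omega
      simp [this]
    have hb1 : ((0 : Int) + 1) * base + min (0 + 1) rem = base + (if 0 < rem then 1 else 0) := by
      have := pv_bnd_shift base rem 0 le_rfl h0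
      have hz : (0 : Int) * base + min 0 rem' = 0 := by
        have : min (0 : Int) rem' = 0 := by omega
        simp [this]
      rw [← hrem'] at this
      omega
    simp only [List.filter_cons, List.filter_map, List.map_map, hb0, hb1]
    have hkey : ∀ k : Int, 0 ≤ k →
        ((k + 1) * base + min (k + 1) rem
          = (base + (if 0 < rem then 1 else 0)) + (k * base + min k rem')) := by
      intro k hk
      rw [hrem']
      exact pv_bnd_shift base rem k hk h0
    have hre := pv_reindex base rem rem' start (base + (if 0 < rem then 1 else 0)) m hkey
    by_cases hc : 0 < base + (if 0 < rem then 1 else 0)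
    · have hcond : ((0:Int) * base + min 0 rem < (0 + 1) * base + min (0 + 1) rem) := by
        rw [hb0, hb1]; exact hc
      simp only [decide_true, if_pos, hc, List.map_cons]
      simp only [List.filter_map, List.map_map] at hre
      rw [hb0, hb1]
      simp only [List.map_map]
      rw [hre]
      rw [add_zero, List.append_assoc, List.singleton_append]
    · simp only [decide_eq_true_eq, if_neg hc]
      simp only [List.filter_map, List.map_map] at hre
      try simp only [List.map_map]
      rw [hre]

-- ===== VERDICT (by name: the statement is the Claim_ definition above) =====
theorem split_ranges_py_spec : Claim_equal_split_ranges_py := by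
  intro total parts _
  unfold Spec_split_ranges_py split_ranges_py split_ranges_py_alt
  by_cases hp : parts ≤ 0
  · have h0 : parts.toNat = 0 := by omega
    simp [hp, h0, pvAltGo]
  · simp only [hp, if_neg, not_false_iff]
    have hpos : 0 < parts := by omega
    set base := PySem.Int.floordiv total parts with hbase
    set rem := PySem.Int.mod total parts with hrem
    have hrem0 : 0 ≤ rem := by
      rw [hrem, PySem.Int.mod_eq_emod_of_pos hpos]
      exact Int.emod_nonneg total (by omega)
    have hremlt : rem < parts := by
      rw [hrem, PySem.Int.mod_eq_emod_of_pos hpos]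
      exact Int.emod_lt_of_pos total hpos
    have hdecomp : total = base * parts + rem := by
      have := PySem.Int.floordiv_mul_add_mod total parts
      rw [← hbase, ← hrem] at this
      omega
    have hcast : ((parts.toNat : Nat) : Int) = parts := by omega
    have key := pv_loop base rem parts.toNat 0 []
    have e1 : (0 : Int) * base + min 0 rem = 0 := by
      have h : min (0 : Int) rem = 0 := by omega
      simp [h]
    have e2 : (0 : Int) + (parts.toNat : Int) = parts := by omega
    rw [e1, e2] at key
    rw [key]
    have keyB := pv_peel parts.toNat base rem 0 total []
      (by rw [hcast]; exact hdecomp) hrem0 (by rw [hcast]; omega)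
    rw [hcast] at keyB
    rw [keyB]
    simp
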